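-- pv_equiv track=rewrite | github.com/raghunandepu/Daily_Coding_Challenge | SmartInterviews/Contest-1/06_Sum_Of_Two_Numbers.py | solve
-- ===== SOURCE A (Python) =====
-- def solve(arr, n):
--     s = set()
--     sum = 0
--     for i in range(n):
--         sum += arr[i]
--     if sum % 2 != 0:
--         return "No"
--     sum = sum // 2
--
--     for i in range(n):
--         target = sum - arr[i]
--         if arr[i] not in s:
--             s.add(arr[i])
--         if target in s:
--             return "Yes"
--     return "No"
-- ===== SOURCE B (Python) =====
-- def solve(arr, n):
--     a = sorted(arr[:n])
--     total = sum(a)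
--     if total % 2 != 0:
--         return "No"
--     half = total // 2
--     left, right = 0, len(a) - 1
--     while left <= right:
--         pair = a[left] + a[right]
--         if pair == half:
--             return "Yes"
--         if pair < half:
--             left += 1
--         else:
--             right -= 1
--     return "No"
-- ===== Notes on version B (the rewrite author's own statement) =====
-- stated objective: alternative
-- what changed: Replaces the incremental hash-set membership scan with sort-then-two-pointers on a sorted copy of the prefix (left <= right so a self-pair still matches), with sum() over the slice instead of an index loop.
-- outside the precondition, e.g. on solve([2, 2, 4, 9], -1): A returns 'No', B returns 'Yes'
import Mathlib
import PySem

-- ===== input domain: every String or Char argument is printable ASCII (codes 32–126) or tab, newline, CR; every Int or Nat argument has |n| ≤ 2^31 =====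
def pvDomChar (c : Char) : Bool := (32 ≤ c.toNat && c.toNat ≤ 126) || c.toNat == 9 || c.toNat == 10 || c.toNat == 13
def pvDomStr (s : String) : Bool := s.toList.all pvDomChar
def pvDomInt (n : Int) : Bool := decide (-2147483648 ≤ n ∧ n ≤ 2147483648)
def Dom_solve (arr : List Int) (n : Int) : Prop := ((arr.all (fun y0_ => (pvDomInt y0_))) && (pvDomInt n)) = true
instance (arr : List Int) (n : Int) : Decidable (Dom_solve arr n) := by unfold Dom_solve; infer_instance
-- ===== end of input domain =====

-- B replaces A's incremental-set pair scan by sort + two pointers (left <= right, so a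
-- self-pair is still found): an alternative algorithm of similar cost; no argument is mutated.

-- ===== PORT A =====
-- second loop of A: for i in range(n): target = sum - arr[i]; if arr[i] not in s: s.add(arr[i]); if target in s: return "Yes"
-- (pyGetD's default is never reached under Pre_solve: every index of range(n) is in range)
def solveLoop (arr : List Int) (half : Int) : PySem.Set Int → List Int → String
  | _, [] => "No"
  | s, i :: rest =>
    let x := PySem.List.pyGetD arr i 0
    let target := half - x
    let s' := if PySem.Set.contains s x then s else PySem.Set.add s x
    if PySem.Set.contains s' target then "Yes" else solveLoop arr half s' rest

def solve (arr : List Int) (n : Int) : String :=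
  let total := (PySem.List.pyRange 0 n 1).foldl (fun acc i => acc + PySem.List.pyGetD arr i 0) 0
  if PySem.Int.mod total 2 ≠ 0 then "No"
  else solveLoop arr (PySem.Int.floordiv total 2) PySem.Set.empty (PySem.List.pyRange 0 n 1)

-- ===== PORT B =====
-- while left <= right: pair = a[left] + a[right]; == half -> "Yes"; < half -> left += 1; else right -= 1
def twoPtr (a : List Int) (half : Int) (l r : Int) : String :=
  if h : l ≤ r then
    let pair := PySem.List.pyGetD a l 0 + PySem.List.pyGetD a r 0
    if pair = half then "Yes"
    else if pair < half then twoPtr a half (l + 1) r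
    else twoPtr a half l (r - 1)
  else "No"
termination_by (r + 1 - l).toNat
decreasing_by all_goals omega

def solve_alt (arr : List Int) (n : Int) : String :=
  let a := PySem.List.sorted (PySem.List.slice arr none (some n)) (fun x => x) false
  let total := a.sum
  if PySem.Int.mod total 2 ≠ 0 then "No"
  else twoPtr a (PySem.Int.floordiv total 2) 0 ((a.length : Int) - 1)

-- ===== PRECONDITION & SPEC =====
-- Pre_solve restricts to the natural domain 0 ≤ n ≤ len(arr): for n > len(arr) A raises
-- IndexError; for negative n (not a meaningful element count) A sums nothing and returns "No"
-- — an accident of range(n) being empty — while B reads the slice arr[:n].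
def Pre_solve (arr : List Int) (n : Int) : Prop := 0 ≤ n ∧ n ≤ (arr.length : Int)
instance (arr : List Int) (n : Int) : Decidable (Pre_solve arr n) := by unfold Pre_solve; infer_instance
def pvWitness_solve : List Int × Int := ([1, 2, 3], 3)

def Spec_solve (arr : List Int) (n : Int) (out : String) : Prop := out = solve_alt arr n
instance (arr : List Int) (n : Int) (out : String) : Decidable (Spec_solve arr n out) := by unfold Spec_solve; infer_instance

-- ===== CLAIM (what is proved, stated in full; the proofs are below) =====
def Claim_equal_solve : Prop := ∀ (arr : List Int) (n : Int), Dom_solve arr n → Pre_solve arr n → Spec_solve arr n (solve arr n)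

-- ===== LEMMAS AND PROOFS =====

-- A's loop over VALUES (proof helper): solveLoop reads arr[i] for each index i; loopV takes the values directly
def loopV (half : Int) : PySem.Set Int → List Int → String
  | _, [] => "No"
  | s, x :: rest =>
    let s' := if PySem.Set.contains s x then s else PySem.Set.add s x
    if PySem.Set.contains s' (half - x) then "Yes" else loopV half s' rest

lemma solveLoop_eq_loopV (arr : List Int) (half : Int) :
    ∀ (is : List Int) (s : PySem.Set Int),
      solveLoop arr half s is = loopV half s (is.map (fun i => PySem.List.pyGetD arr i 0)) := by
  intro is
  induction is with
  | nil => intro s; rfl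
  | cons i rest ih => intro s; simp only [solveLoop, loopV, List.map_cons, ih]

lemma mem_addGuard (s : PySem.Set Int) (x y : Int) :
    y ∈ (if PySem.Set.contains s x then s else PySem.Set.add s x) ↔ y ∈ s ∨ y = x := by
  by_cases h : PySem.Set.contains s x = true
  · rw [if_pos h]
    constructor
    · exact fun hy => Or.inl hy
    · rintro (hy | rfl)
      · exact hy
      · exact (PySem.Set.contains_iff s y).mp h
  · rw [if_neg h]
    exact PySem.Set.mem_add s x y

lemma loopV_yes (half : Int) :
    ∀ (l : List Int) (s : PySem.Set Int),
      loopV half s l = "Yes" ↔ ∃ x ∈ l, (half - x) ∈ s ∨ (half - x) ∈ l := by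
  intro l
  induction l with
  | nil => intro s; simp [loopV]
  | cons z rest ih =>
    intro s
    simp only [loopV]
    by_cases hg : PySem.Set.contains (if PySem.Set.contains s z then s else PySem.Set.add s z) (half - z) = true
    · -- the guard fires: "Yes"; produce the witness
      rw [if_pos hg]
      have hmem := (PySem.Set.contains_iff _ (half - z)).mp hg
      rw [mem_addGuard] at hmem
      constructor
      · intro _
        rcases hmem with hs | hz
        · exact ⟨z, List.mem_cons_self .., Or.inl hs⟩
        · exact ⟨z, List.mem_cons_self .., Or.inr (by rw [hz]; exact List.mem_cons_self ..)⟩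
      · intro _; rfl
    · rw [if_neg hg, ih]
      have hnot : ¬ ((half - z) ∈ s ∨ half - z = z) := by
        intro hc
        exact hg ((PySem.Set.contains_iff _ (half - z)).mpr ((mem_addGuard s z (half - z)).mpr hc))
      rw [not_or] at hnot
      constructor
      · rintro ⟨x, hx, hy⟩
        refine ⟨x, List.mem_cons_of_mem _ hx, ?_⟩
        rcases hy with hy | hy
        · rw [mem_addGuard] at hy
          rcases hy with hy | hy
          · exact Or.inl hy
          · exact Or.inr (by rw [hy]; exact List.mem_cons_self ..)
        · exact Or.inr (List.mem_cons_of_mem _ hy)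
      · rintro ⟨x, hx, hy⟩
        rcases List.mem_cons.mp hx with rfl | hx'
        · -- x = z: the guard failed, so half - z ∉ s and half - z ≠ z; hence half - z ∈ rest
          rcases hy with hy | hy
          · exact absurd hy hnot.1
          · rcases List.mem_cons.mp hy with hy' | hy'
            · exact absurd hy' hnot.2
            · -- half - z ∈ rest is the witness; its partner z is in the updated set
              exact ⟨half - x, hy', Or.inl (by rw [mem_addGuard]; exact Or.inr (by ring))⟩
        · rcases hy with hy | hy
          · exact ⟨x, hx', Or.inl (by rw [mem_addGuard]; exact Or.inl hy)⟩
          · rcases List.mem_cons.mp hy with hy' | hy'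
            · exact ⟨x, hx', Or.inl (by rw [mem_addGuard]; exact Or.inr hy')⟩
            · exact ⟨x, hx', Or.inr hy'⟩

lemma loopV_cases (half : Int) :
    ∀ (l : List Int) (s : PySem.Set Int), loopV half s l = "Yes" ∨ loopV half s l = "No" := by
  intro l
  induction l with
  | nil => intro s; exact Or.inr rfl
  | cons z rest ih =>
    intro s
    simp only [loopV]
    by_cases hg : PySem.Set.contains (if PySem.Set.contains s z then s else PySem.Set.add s z) (half - z) = true
    · rw [if_pos hg]; exact Or.inl rfl
    · rw [if_neg hg]; exact ih _

lemma twoPtr_cases (a : List Int) (half : Int) :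
    ∀ (l r : Int), twoPtr a half l r = "Yes" ∨ twoPtr a half l r = "No" := by
  have main : ∀ (fuel : Nat) (l r : Int), (r + 1 - l).toNat ≤ fuel →
      twoPtr a half l r = "Yes" ∨ twoPtr a half l r = "No" := by
    intro fuel
    induction fuel with
    | zero =>
      intro l r hf
      rw [twoPtr, dif_neg (by omega : ¬ l ≤ r)]
      exact Or.inr rfl
    | succ fuel ih =>
      intro l r hf
      by_cases hlr : l ≤ r
      · rw [twoPtr]
        simp only [hlr, dif_pos]
        by_cases hp : PySem.List.pyGetD a l 0 + PySem.List.pyGetD a r 0 = half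
        · simp only [hp, if_pos]; exact Or.inl trivial
        · simp only [hp, if_neg, not_false_iff]
          by_cases hlt : PySem.List.pyGetD a l 0 + PySem.List.pyGetD a r 0 < half
          · simp only [hlt, if_pos]; exact ih (l + 1) r (by omega)
          · simp only [hlt, if_neg, not_false_iff]; exact ih l (r - 1) (by omega)
      · rw [twoPtr, dif_neg hlr]; exact Or.inr rfl
  exact fun l r => main (r + 1 - l).toNat l r (le_refl _)

lemma twoPtr_char (a : List Int) (half : Int)
    (hmono : ∀ i j : Nat, i ≤ j → j < a.length → a.getD i 0 ≤ a.getD j 0) :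
    ∀ (l r : Int), 0 ≤ l → r < (a.length : Int) →
      (twoPtr a half l r = "Yes" ↔
        ∃ i j : Nat, l ≤ (i : Int) ∧ i ≤ j ∧ (j : Int) ≤ r ∧ a.getD i 0 + a.getD j 0 = half) := by
  have main : ∀ (fuel : Nat) (l r : Int), (r + 1 - l).toNat ≤ fuel → 0 ≤ l → r < (a.length : Int) →
      (twoPtr a half l r = "Yes" ↔
        ∃ i j : Nat, l ≤ (i : Int) ∧ i ≤ j ∧ (j : Int) ≤ r ∧ a.getD i 0 + a.getD j 0 = half) := by
    intro fuel
    induction fuel with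
    | zero =>
      intro l r hf hl hr
      rw [twoPtr, dif_neg (by omega : ¬ l ≤ r)]
      constructor
      · intro h; exact absurd h (by decide)
      · rintro ⟨i, j, h1, h2, h3, _⟩; omega
    | succ fuel ih =>
      intro l r hf hl hr
      by_cases hlr : l ≤ r
      · have hr0 : 0 ≤ r := le_trans hl hlr
        have hgl : PySem.List.pyGetD a l 0 = a.getD l.toNat 0 := PySem.List.pyGetD_of_nonneg a 0 hl
        have hgr : PySem.List.pyGetD a r 0 = a.getD r.toNat 0 := PySem.List.pyGetD_of_nonneg a 0 hr0
        rw [twoPtr]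
        simp only [hlr, dif_pos]
        by_cases hp : PySem.List.pyGetD a l 0 + PySem.List.pyGetD a r 0 = half
        · simp only [hp, if_pos]
          constructor
          · intro _
            refine ⟨l.toNat, r.toNat, by omega, by omega, by omega, ?_⟩
            rw [← hgl, ← hgr]; exact hp
          · intro _; trivial
        · simp only [hp, if_neg, not_false_iff]
          rw [hgl, hgr] at hp
          by_cases hlt : a.getD l.toNat 0 + a.getD r.toNat 0 < half
          · have hlt' : PySem.List.pyGetD a l 0 + PySem.List.pyGetD a r 0 < half := by
              rw [hgl, hgr]; exact hlt
            simp only [hlt', if_pos]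
            rw [ih (l + 1) r (by omega) (by omega) hr]
            constructor
            · rintro ⟨i, j, h1, h2, h3, h4⟩
              exact ⟨i, j, by omega, h2, h3, h4⟩
            · rintro ⟨i, j, h1, h2, h3, h4⟩
              refine ⟨i, j, ?_, h2, h3, h4⟩
              by_contra hcon
              have hjle : j ≤ r.toNat := by omega
              have hle : a.getD j 0 ≤ a.getD r.toNat 0 := hmono j r.toNat hjle (by omega)
              have hil : a.getD i 0 = a.getD l.toNat 0 := by congr 1; omega
              rw [hil] at h4
              omega
          · have hlt' : ¬ PySem.List.pyGetD a l 0 + PySem.List.pyGetD a r 0 < half := by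
              rw [hgl, hgr]; exact hlt
            simp only [hlt', if_neg, not_false_iff]
            rw [ih l (r - 1) (by omega) hl (by omega)]
            constructor
            · rintro ⟨i, j, h1, h2, h3, h4⟩
              exact ⟨i, j, h1, h2, by omega, h4⟩
            · rintro ⟨i, j, h1, h2, h3, h4⟩
              refine ⟨i, j, h1, h2, ?_, h4⟩
              by_contra hcon
              have hli : l.toNat ≤ i := by omega
              have hle : a.getD l.toNat 0 ≤ a.getD i 0 := hmono l.toNat i hli (by omega)
              have hjr : a.getD j 0 = a.getD r.toNat 0 := by congr 1; omega
              rw [hjr] at h4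
              omega
      · rw [twoPtr, dif_neg hlr]
        constructor
        · intro h; exact absurd h (by decide)
        · rintro ⟨i, j, h1, h2, h3, _⟩; omega
  intro l r hl hr
  exact main (r + 1 - l).toNat l r (le_refl _) hl hr

lemma exists_pair_iff (a : List Int) (half : Int) :
    (∃ i j : Nat, (0 : Int) ≤ (i : Int) ∧ i ≤ j ∧ (j : Int) ≤ (a.length : Int) - 1 ∧
        a.getD i 0 + a.getD j 0 = half) ↔ ∃ x ∈ a, (half - x) ∈ a := by
  constructor
  · rintro ⟨i, j, _, hij, hj, hsum⟩
    have hjlen : j < a.length := by omega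
    have hilen : i < a.length := by omega
    refine ⟨a.getD i 0, ?_, ?_⟩
    · rw [List.getD_eq_getElem a 0 hilen]; exact List.getElem_mem hilen
    · have h : half - a.getD i 0 = a.getD j 0 := by omega
      rw [h, List.getD_eq_getElem a 0 hjlen]; exact List.getElem_mem hjlen
  · rintro ⟨x, hx, hy⟩
    obtain ⟨ki, hki, hxi⟩ := List.getElem_of_mem hx
    obtain ⟨kj, hkj, hyj⟩ := List.getElem_of_mem hy
    rcases le_total ki kj with hle | hle
    · refine ⟨ki, kj, by omega, hle, by omega, ?_⟩
      rw [List.getD_eq_getElem a 0 hki, List.getD_eq_getElem a 0 hkj, hxi, hyj]; ring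
    · refine ⟨kj, ki, by omega, hle, by omega, ?_⟩
      rw [List.getD_eq_getElem a 0 hkj, List.getD_eq_getElem a 0 hki, hxi, hyj]; ring

lemma map_range_take (arr : List Int) (n : Int) (h0 : 0 ≤ n) (hn : n ≤ (arr.length : Int)) :
    (PySem.List.pyRange 0 n 1).map (fun i => PySem.List.pyGetD arr i 0) = arr.take n.toNat := by
  set pref := arr.take n.toNat with hpref
  have hlen : (pref.length : Int) = n := by
    simp only [hpref, List.length_take]; omega
  have hcongr : ∀ i ∈ PySem.List.pyRange 0 n 1,
      PySem.List.pyGetD arr i 0 = PySem.List.pyGetD pref i 0 := by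
    intro i hi
    rw [PySem.List.mem_pyRange_one] at hi
    rw [PySem.List.pyGetD_of_nonneg arr 0 hi.1, PySem.List.pyGetD_of_nonneg pref 0 hi.1]
    have hilt : i.toNat < n.toNat := by omega
    simp only [hpref, List.getD, List.getElem?_take, hilt, if_pos]
  rw [List.map_congr_left hcongr, ← hlen]
  exact PySem.List.map_pyGetD_pyRange_zero' pref 0

lemma sorted_getD_mono (xs : List Int) :
    ∀ i j : Nat, i ≤ j → j < (PySem.List.sorted xs (fun x => x) false).length →
      (PySem.List.sorted xs (fun x => x) false).getD i 0 ≤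
      (PySem.List.sorted xs (fun x => x) false).getD j 0 := by
  intro i j hij hj
  rw [List.getD_eq_getElem _ 0 hj, List.getD_eq_getElem _ 0 (by omega)]
  exact PySem.List.sorted_id_getElem_mono xs hij hj

-- ===== VERDICT (by name: the statement is the Claim_ definition above) =====
theorem solve_spec : Claim_equal_solve := by
  intro arr n _ hpre
  obtain ⟨h0, hn⟩ := hpre
  unfold Spec_solve solve solve_alt
  set pref := arr.take n.toNat with hpref
  set a := PySem.List.sorted (PySem.List.slice arr none (some n)) (fun x => x) false with ha
  have hslice : PySem.List.slice arr none (some n) = pref := PySem.List.slice_to arr h0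
  have hperm : a.Perm pref := by rw [ha, hslice]; exact PySem.List.sorted_perm pref _ _
  -- the two totals agree
  have htot : (PySem.List.pyRange 0 n 1).foldl (fun acc i => acc + PySem.List.pyGetD arr i 0) 0
      = a.sum := by
    have h1 : (PySem.List.pyRange 0 n 1).foldl (fun acc i => acc + PySem.List.pyGetD arr i 0) 0
        = ((PySem.List.pyRange 0 n 1).map (fun i => PySem.List.pyGetD arr i 0)).foldl
            (fun acc x => acc + x) 0 := (List.foldl_map).symm
    rw [h1, map_range_take arr n h0 hn, ← hpref, ← List.sum_eq_foldl, hperm.sum_eq]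
  rw [htot]
  by_cases hmod : PySem.Int.mod a.sum 2 ≠ 0
  · rw [if_pos hmod, if_pos hmod]
  · rw [if_neg hmod, if_neg hmod]
    set half := PySem.Int.floordiv a.sum 2 with hhalf
    rw [solveLoop_eq_loopV arr half (PySem.List.pyRange 0 n 1) PySem.Set.empty,
      map_range_take arr n h0 hn, ← hpref]
    -- both sides say "Yes" exactly on ∃ x ∈ pref, (half - x) ∈ pref
    have hA : loopV half PySem.Set.empty pref = "Yes" ↔ ∃ x ∈ pref, (half - x) ∈ pref := by
      rw [loopV_yes]
      constructor
      · rintro ⟨x, hx, hy | hy⟩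
        · exact absurd hy (by simp [PySem.Set.empty])
        · exact ⟨x, hx, hy⟩
      · rintro ⟨x, hx, hy⟩; exact ⟨x, hx, Or.inr hy⟩
    have hB : twoPtr a half 0 ((a.length : Int) - 1) = "Yes" ↔ ∃ x ∈ pref, (half - x) ∈ pref := by
      rw [twoPtr_char a half (by rw [ha]; exact sorted_getD_mono _) 0 ((a.length : Int) - 1)
        (le_refl 0) (by omega), exists_pair_iff]
      constructor
      · rintro ⟨x, hx, hy⟩; exact ⟨x, hperm.mem_iff.mp hx, hperm.mem_iff.mp hy⟩
      · rintro ⟨x, hx, hy⟩; exact ⟨x, hperm.mem_iff.mpr hx, hperm.mem_iff.mpr hy⟩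
    have hiff := hA.trans hB.symm
    rcases loopV_cases half pref PySem.Set.empty with hA2 | hA2
    · rw [hA2, hiff.mp hA2]
    · rcases twoPtr_cases a half 0 ((a.length : Int) - 1) with hB2 | hB2
      · exact absurd (hiff.mpr hB2) (by rw [hA2]; decide)
      · rw [hA2, hB2]
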